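-- pv_equiv track=rewrite | github.com/softlayer/softlayer-python | SoftLayer/CLI/object_storage/list_endpoints.py | sort_endpoint
-- ===== SOURCE A (Python) =====
-- def sort_endpoint(endpoints):
--     """Sort the all endpoints for public or private"""
--     first_data = 0
--     endpoint_type = ''
--     if len(endpoints) > 0:
--         endpoint_type = endpoints[first_data]['EndPoint Type']
--     public = []
--     private = []
--     array_final = []
--     for endpoint in endpoints:
--         if endpoint['EndPoint Type'] != endpoint_type:
--             endpoint_type = endpoint['EndPoint Type']
--             array_final = array_final + public + private
--             public.clear()
--             private.clear()
--         if endpoint['Public/Private'] == 'Public':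
--             public.append(endpoint)
--         else:
--             private.append(endpoint)
--
--     array_final = array_final + public + private
--     return array_final
-- ===== SOURCE B (Python) =====
-- def sort_endpoint(endpoints):
--     """Sort the all endpoints for public or private"""
--     n = len(endpoints)
--     ranks = []
--     rid = 0
--     prev_type = None
--     for i, e in enumerate(endpoints):
--         t = e['EndPoint Type']
--         if prev_type is not None and t != prev_type:
--             rid += 1
--         prev_type = t
--         ranks.append((2 * rid + (0 if e['Public/Private'] == 'Public' else 1)) * n + i)
--     return [endpoints[r % n] for r in sorted(ranks)]
-- ===== Notes on version B (the rewrite author's own statement) =====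
-- stated objective: alternative
-- what changed: B is decorate-sort-undecorate: one pass assigns every endpoint an integer rank (2*runId + privacyFlag)*n + index, then a single plain sort of the ranks gives the output order, decoded back to elements by index = rank % n; A instead buffers each run into public/private lists and rebuilds the whole accumulated result list at every run boundary.
import Mathlib
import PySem

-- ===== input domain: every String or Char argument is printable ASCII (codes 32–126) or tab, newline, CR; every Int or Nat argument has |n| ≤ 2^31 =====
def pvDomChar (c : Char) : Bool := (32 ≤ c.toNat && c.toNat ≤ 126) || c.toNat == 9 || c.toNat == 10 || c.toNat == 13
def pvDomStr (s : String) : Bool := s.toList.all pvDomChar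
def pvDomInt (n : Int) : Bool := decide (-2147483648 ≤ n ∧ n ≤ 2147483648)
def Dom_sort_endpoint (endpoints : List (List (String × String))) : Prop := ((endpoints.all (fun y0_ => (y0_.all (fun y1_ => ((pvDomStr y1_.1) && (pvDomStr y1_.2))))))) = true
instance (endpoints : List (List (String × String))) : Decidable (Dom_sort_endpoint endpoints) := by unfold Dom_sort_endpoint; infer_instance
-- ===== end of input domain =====

-- B is a decorate-sort-undecorate algorithm: one pass assigns each endpoint an
-- integer rank (2*runId + privacyFlag)*n + index, then a single plain integer
-- sort of the ranks yields the output order, decoded by index = rank % n; it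
-- replaces A's per-element loop over two buffers that rebuilds the accumulated
-- result list at every run boundary (objective: alternative algorithm).

-- dict lookup e[k] on an endpoint (unique keys; presence of both keys is Pre_)
def epGet (e : List (String × String)) (k : String) : String :=
  (List.lookup k e).getD ""

-- ===== PORT A =====
-- the for-loop of A over (endpoint_type, public, private, array_final)
def sortLoopA (l : List (List (String × String))) (t : String)
    (pub priv acc : List (List (String × String))) : List (List (String × String)) :=
  match l with
  | [] => acc ++ pub ++ priv
  | e :: rest =>
    if epGet e "EndPoint Type" != t then
      -- boundary: flush both buffers, start new type
      if epGet e "Public/Private" == "Public" then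
        sortLoopA rest (epGet e "EndPoint Type") [e] [] (acc ++ pub ++ priv)
      else
        sortLoopA rest (epGet e "EndPoint Type") [] [e] (acc ++ pub ++ priv)
    else
      if epGet e "Public/Private" == "Public" then
        sortLoopA rest t (pub ++ [e]) priv acc
      else
        sortLoopA rest t pub (priv ++ [e]) acc

def sort_endpoint (endpoints : List (List (String × String))) : List (List (String × String)) :=
  let endpoint_type := match endpoints with
    | [] => ""
    | e :: _ => epGet e "EndPoint Type"
  sortLoopA endpoints endpoint_type [] [] []

-- ===== PORT B =====
-- Source B's for-loop body over enumerate(endpoints); state = (rid, prev_type, ranks)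
def ranksLoop (n : Int) (st : Int × Option String × List Int)
    (p : Int × List (String × String)) : Int × Option String × List Int :=
  let t := epGet p.2 "EndPoint Type"
  -- 'if prev_type is not None and t != prev_type: rid += 1'
  let rid := match st.2.1 with
    | some pt => if t ≠ pt then st.1 + 1 else st.1
    | none => st.1
  (rid, some t,
    st.2.2 ++ [(2 * rid + (if epGet p.2 "Public/Private" = "Public" then 0 else 1)) * n + p.1])

def sort_endpoint_alt (endpoints : List (List (String × String))) : List (List (String × String)) :=
  let n : Int := endpoints.length
  let ranks := ((PySem.List.enumerate endpoints 0).foldl (ranksLoop n) (0, none, [])).2.2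
  -- '[endpoints[r % n] for r in sorted(ranks)]'; the index r % n is always in
  -- range when the list is nonempty, so pyGetD with default [] is exact here
  (PySem.List.sorted ranks (fun r => r) false).map
    (fun r => PySem.List.pyGetD endpoints (PySem.Int.mod r n) [])

-- ===== PRECONDITION & SPEC =====
-- Pre_ excludes endpoints missing either key, where the Python (A and B alike) raises KeyError.
def Pre_sort_endpoint (endpoints : List (List (String × String))) : Prop :=
  ∀ e ∈ endpoints, (List.lookup "EndPoint Type" e).isSome ∧ (List.lookup "Public/Private" e).isSome
instance (endpoints : List (List (String × String))) : Decidable (Pre_sort_endpoint endpoints) := by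
  unfold Pre_sort_endpoint; infer_instance
def pvWitness_sort_endpoint : (List (List (String × String))) :=
  [[("EndPoint Type", "dal"), ("Public/Private", "Public")],
   [("EndPoint Type", "dal"), ("Public/Private", "Private")]]

def Spec_sort_endpoint (endpoints : List (List (String × String))) (out : List (List (String × String))) : Prop := out = sort_endpoint_alt endpoints
instance (endpoints : List (List (String × String))) (out : List (List (String × String))) : Decidable (Spec_sort_endpoint endpoints out) := by unfold Spec_sort_endpoint; infer_instance

-- ===== CLAIM (what is proved, stated in full; the proofs are below) =====
def Claim_equal_sort_endpoint : Prop := ∀ (endpoints : List (List (String × String))), Dom_sort_endpoint endpoints → Pre_sort_endpoint endpoints → Spec_sort_endpoint endpoints (sort_endpoint endpoints)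

-- ===== LEMMAS AND PROOFS =====

-- the canonical output: concatenation over maximal same-type runs of
-- (Public members in order) ++ (non-Public members in order)
def canonRuns : List (List (String × String)) → List (List (String × String))
  | [] => []
  | e :: es =>
    let t := epGet e "EndPoint Type"
    let run := e :: es.takeWhile (fun x => epGet x "EndPoint Type" == t)
    run.filter (fun x => epGet x "Public/Private" == "Public")
      ++ run.filter (fun x => epGet x "Public/Private" != "Public")
      ++ canonRuns (es.dropWhile (fun x => epGet x "EndPoint Type" == t))
  termination_by l => l.length
  decreasing_by simpa using Nat.lt_succ_of_le (List.length_dropWhile_le _ es)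

-- the rank Source B assigns to the element of a pair produced by enumerate
def rankF (n rid : Int) (p : Int × List (String × String)) : Int :=
  (2 * rid + (if epGet p.2 "Public/Private" = "Public" then 0 else 1)) * n + p.1

-- Source B's rank list as a structural recursion (prev_type carried explicitly)
def ranksRec (n : Int) : List (List (String × String)) → Option String → Int → Int → List Int
  | [], _, _, _ => []
  | e :: es, prev, rid, i =>
    let rid' := match prev with
      | some pt => if epGet e "EndPoint Type" ≠ pt then rid + 1 else rid
      | none => rid
    ((2 * rid' + (if epGet e "Public/Private" = "Public" then 0 else 1)) * n + i)
      :: ranksRec n es (some (epGet e "EndPoint Type")) rid' (i + 1)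

-- the rank list rearranged into canonical output order
def canonRanks (n : Int) : List (List (String × String)) → Int → Int → List Int
  | [] , _, _ => []
  | e :: es, rid, i =>
    let t := epGet e "EndPoint Type"
    let run := e :: es.takeWhile (fun x => epGet x "EndPoint Type" == t)
    ((PySem.List.enumerate run i).filter (fun p => epGet p.2 "Public/Private" == "Public")).map (rankF n rid)
      ++ ((PySem.List.enumerate run i).filter (fun p => epGet p.2 "Public/Private" != "Public")).map (rankF n rid)
      ++ canonRanks n (es.dropWhile (fun x => epGet x "EndPoint Type" == t)) (rid + 1) (i + run.length)
  termination_by l => l.length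
  decreasing_by simpa using Nat.lt_succ_of_le (List.length_dropWhile_le _ es)

-- ---- A-side: A's loop produces the canonical output ----
theorem sortLoopA_eq_canon (l : List (List (String × String))) :
    ∀ (t : String) (pub priv acc : List (List (String × String))),
    sortLoopA l t pub priv acc =
      acc ++ (pub ++ (l.takeWhile (fun x => epGet x "EndPoint Type" == t)).filter
                        (fun x => epGet x "Public/Private" == "Public"))
          ++ (priv ++ (l.takeWhile (fun x => epGet x "EndPoint Type" == t)).filter
                        (fun x => epGet x "Public/Private" != "Public"))
          ++ canonRuns (l.dropWhile (fun x => epGet x "EndPoint Type" == t)) := by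
  induction l with
  | nil => intro t pub priv acc; simp [sortLoopA, canonRuns]
  | cons e es ih =>
    intro t pub priv acc
    by_cases ht : epGet e "EndPoint Type" = t
    · have h1 : (epGet e "EndPoint Type" != t) = false := by simp [ht]
      by_cases hp : epGet e "Public/Private" = "Public"
      · simp only [sortLoopA, h1, Bool.false_eq_true, if_false, beq_iff_eq, hp, if_true]
        rw [ih]
        simp [ht, hp]
      · simp only [sortLoopA, h1, Bool.false_eq_true, if_false, beq_iff_eq, hp, if_false]
        rw [ih]
        simp [ht, hp]
    · have h1 : (epGet e "EndPoint Type" != t) = true := by simp [ht]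
      have hts : (epGet e "EndPoint Type" == t) = false := by simp [ht]
      by_cases hp : epGet e "Public/Private" = "Public"
      · simp only [sortLoopA, h1, if_true, beq_iff_eq, hp, if_true]
        rw [ih]
        conv_rhs => rw [List.takeWhile_cons, List.dropWhile_cons, hts]
        conv_rhs => rw [canonRuns.eq_def]
        simp [hp]
      · simp only [sortLoopA, h1, if_true, beq_iff_eq, hp, if_false]
        rw [ih]
        conv_rhs => rw [List.takeWhile_cons, List.dropWhile_cons, hts]
        conv_rhs => rw [canonRuns.eq_def]
        simp [hp]

theorem sort_endpoint_eq_canon (endpoints : List (List (String × String))) :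
    sort_endpoint endpoints = canonRuns endpoints := by
  cases endpoints with
  | nil => simp [sort_endpoint, sortLoopA, canonRuns]
  | cons e es =>
    show sortLoopA (e :: es) (epGet e "EndPoint Type") [] [] [] = _
    rw [sortLoopA_eq_canon]
    conv_rhs => rw [canonRuns.eq_def]
    simp

-- ---- B-side ----
-- the foldl of the port equals ranksRec
theorem foldl_ranksLoop (n : Int) (l : List (List (String × String))) :
    ∀ (s rid : Int) (prev : Option String) (racc : List Int),
    ((PySem.List.enumerate l s).foldl (ranksLoop n) (rid, prev, racc)).2.2 =
      racc ++ ranksRec n l prev rid s := by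
  intro s rid prev racc
  induction l generalizing s rid prev racc with
  | nil => simp [PySem.List.enumerate, ranksRec]
  | cons e es ih =>
    simp only [PySem.List.enumerate, List.foldl_cons, ranksLoop, ranksRec]
    rw [ih]
    cases prev with
    | none => simp
    | some pt => by_cases h : epGet e "EndPoint Type" ≠ pt <;> simp [h]

-- heads of dropWhile falsify the predicate
theorem dropWhile_head_false {α : Type} (p : α → Bool) (l : List α) (h : α)
    (hs : List α) (he : l.dropWhile p = h :: hs) : p h = false := by
  induction l with
  | nil => simp [List.dropWhile] at he
  | cons x xs ih =>
    rw [List.dropWhile_cons] at he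
    by_cases hp : p x = true
    · exact ih (by simpa [hp] using he)
    · rw [if_neg hp] at he
      cases he
      simpa using hp

-- starting a fresh run: prev = some t with head ≠ t behaves as none with rid+1
theorem ranksRec_some_eq_none (n : Int) (t : String) (l : List (List (String × String)))
    (rid i : Int) (hl : ∀ h hs, l = h :: hs → epGet h "EndPoint Type" ≠ t) :
    ranksRec n l (some t) rid i = ranksRec n l none (rid + 1) i := by
  cases l with
  | nil => rfl
  | cons h hs =>
    have hne : epGet h "EndPoint Type" ≠ t := hl h hs rfl
    simp [ranksRec, hne]

-- within a run: ranksRec maps rankF over the enumerated run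
theorem ranksRec_run (n : Int) (t : String) (es : List (List (String × String))) :
    ∀ (rid i : Int),
    ranksRec n es (some t) rid i =
      (PySem.List.enumerate (es.takeWhile (fun x => epGet x "EndPoint Type" == t)) i).map (rankF n rid)
        ++ ranksRec n (es.dropWhile (fun x => epGet x "EndPoint Type" == t)) (some t) rid
             (i + (es.takeWhile (fun x => epGet x "EndPoint Type" == t)).length) := by
  induction es with
  | nil => intro rid i; simp [ranksRec]
  | cons h hs ih =>
    intro rid i
    by_cases hh : epGet h "EndPoint Type" = t
    · rw [List.takeWhile_cons, List.dropWhile_cons]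
      simp only [hh, beq_self_eq_true, if_true]
      simp only [ranksRec, hh, ne_eq, not_true_eq_false, if_false, PySem.List.enumerate,
        List.map_cons, rankF]
      rw [ih]
      simp only [List.length_cons, List.cons_append]
      push_cast
      ring_nf
    · rw [List.takeWhile_cons, List.dropWhile_cons]
      have hf : (epGet h "EndPoint Type" == t) = false := by simp [hh]
      simp [hf]

-- run split of the whole rank list
theorem ranksRec_split (n : Int) (e : List (String × String))
    (es : List (List (String × String))) (rid i : Int) :
    ranksRec n (e :: es) none rid i =
      (PySem.List.enumerate
          (e :: es.takeWhile (fun x => epGet x "EndPoint Type" == epGet e "EndPoint Type")) i).map (rankF n rid)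
        ++ ranksRec n (es.dropWhile (fun x => epGet x "EndPoint Type" == epGet e "EndPoint Type")) none (rid + 1)
             (i + (1 + (es.takeWhile (fun x => epGet x "EndPoint Type" == epGet e "EndPoint Type")).length)) := by
  simp only [ranksRec, PySem.List.enumerate, List.map_cons]
  rw [ranksRec_run, ranksRec_some_eq_none n _ _ _ _
    (fun h hs he => by
      have := dropWhile_head_false _ es h hs he
      simpa using this)]
  simp only [rankF, List.cons_append]
  push_cast
  ring_nf

-- canonRanks is a permutation of the rank list
theorem canonRanks_perm (n : Int) (l : List (List (String × String))) :
    ∀ (rid i : Int), (canonRanks n l rid i).Perm (ranksRec n l none rid i) := by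
  cases l with
  | nil => intro rid i; simp [canonRanks, ranksRec]
  | cons e es =>
    intro rid i
    rw [ranksRec_split n e es rid i]
    simp only [canonRanks]
    refine List.Perm.append ?_ ?_
    · rw [← List.map_append]
      exact List.Perm.map _ (List.filter_append_perm _ _)
    · have hidx : (i : Int) + ((e :: es.takeWhile (fun x => epGet x "EndPoint Type" == epGet e "EndPoint Type")).length : Nat) =
          i + (1 + ((es.takeWhile (fun x => epGet x "EndPoint Type" == epGet e "EndPoint Type")).length : Int)) := by
        simp only [List.length_cons]; push_cast; ring
      rw [hidx]
      exact canonRanks_perm n _ (rid + 1) _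
termination_by l.length
decreasing_by simpa using Nat.lt_succ_of_le (List.length_dropWhile_le _ es)

-- every canonical rank is at least 2*rid*n + i
theorem canonRanks_lb (n : Int) (hn : 0 ≤ n) (l : List (List (String × String))) :
    ∀ (rid i r : Int), 0 ≤ i → r ∈ canonRanks n l rid i → 2 * rid * n + i ≤ r := by
  cases l with
  | nil => intro rid i r h0 hm; simp [canonRanks] at hm
  | cons e es =>
    intro rid i r h0 hm
    simp only [canonRanks, List.mem_append, List.mem_map, List.mem_filter] at hm
    rcases hm with (⟨p, ⟨hp, _⟩, rfl⟩ | ⟨p, ⟨hp, _⟩, rfl⟩) | hrec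
    · obtain ⟨k, hk, rfl⟩ := (PySem.List.mem_enumerate_iff _ _ _).1 hp
      simp only [rankF]
      have hf : (0:Int) ≤ (if epGet ((e :: es.takeWhile (fun x => epGet x "EndPoint Type" == epGet e "EndPoint Type"))[k]) "Public/Private" = "Public" then 0 else 1) := by
        split <;> norm_num
      have hk0 : (0:Int) ≤ (k : Int) := Int.natCast_nonneg k
      nlinarith [hf, hn, hk0]
    · obtain ⟨k, hk, rfl⟩ := (PySem.List.mem_enumerate_iff _ _ _).1 hp
      simp only [rankF]
      have hf : (0:Int) ≤ (if epGet ((e :: es.takeWhile (fun x => epGet x "EndPoint Type" == epGet e "EndPoint Type"))[k]) "Public/Private" = "Public" then 0 else 1) := by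
        split <;> norm_num
      have hk0 : (0:Int) ≤ (k : Int) := Int.natCast_nonneg k
      nlinarith [hf, hn, hk0]
    · have hL : (0:Int) ≤ ((e :: es.takeWhile (fun x => epGet x "EndPoint Type" == epGet e "EndPoint Type")).length : Int) := by positivity
      have := canonRanks_lb n hn _ (rid + 1) _ r (by linarith) hrec
      nlinarith [hn, hL]
termination_by l.length
decreasing_by simpa using Nat.lt_succ_of_le (List.length_dropWhile_le _ es)

-- canonical ranks are strictly increasing
theorem canonRanks_pairwise (n : Int) (l : List (List (String × String))) :
    ∀ (rid i : Int), 0 ≤ i → i + l.length ≤ n →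
    (canonRanks n l rid i).Pairwise (· < ·) := by
  cases l with
  | nil => intro rid i h0 hl; simp [canonRanks]
  | cons e es =>
    intro rid i h0 hl
    have hn : (0:Int) ≤ n := by simp at hl; omega
    simp only [canonRanks]
    have hrl : (e :: es.takeWhile (fun x => epGet x "EndPoint Type" == epGet e "EndPoint Type")).length ≤ (e :: es).length := by
      simp only [List.length_cons]
      exact Nat.succ_le_succ (List.IsPrefix.length_le (List.takeWhile_prefix _))
    -- every enumerated index of the run lies in [i, n)
    have hidx : ∀ p ∈ PySem.List.enumerate (e :: es.takeWhile (fun x => epGet x "EndPoint Type" == epGet e "EndPoint Type")) i,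
        i ≤ p.1 ∧ p.1 < n := by
      intro p hp
      obtain ⟨k, hk, rfl⟩ := (PySem.List.mem_enumerate_iff _ _ _).1 hp
      have hk' : k < (e :: es).length := lt_of_lt_of_le hk hrl
      simp only [List.length_cons] at hk' hl
      refine ⟨?_, ?_⟩
      · show i ≤ i + (k : Int)
        omega
      · show i + (k : Int) < n
        omega
    have hrest : (i + ((e :: es.takeWhile (fun x => epGet x "EndPoint Type" == epGet e "EndPoint Type")).length : Int)) +
        ((es.dropWhile (fun x => epGet x "EndPoint Type" == epGet e "EndPoint Type")).length : Int) ≤ n := by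
      have hsplit := congrArg List.length
        (List.takeWhile_append_dropWhile (p := fun x => epGet x "EndPoint Type" == epGet e "EndPoint Type") (l := es))
      simp only [List.length_append] at hsplit
      simp only [List.length_cons] at hl ⊢
      push_cast
      omega
    -- pairwise inside one block: all members share one flag value f
    have hblock : ∀ (q : Int × List (String × String) → Bool) (f : Int),
        (∀ p, q p = true → (if epGet p.2 "Public/Private" = "Public" then (0:Int) else 1) = f) →
        (((PySem.List.enumerate (e :: es.takeWhile (fun x => epGet x "EndPoint Type" == epGet e "EndPoint Type")) i).filter q).map (rankF n rid)).Pairwise (· < ·) := by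
      intro q f hq
      rw [List.pairwise_map]
      refine List.Pairwise.imp_of_mem ?_ ((PySem.List.pairwise_lt_enumerate _ _).filter q)
      intro a b ha hb hab
      have ha' := hq a (List.mem_filter.1 ha).2
      have hb' := hq b (List.mem_filter.1 hb).2
      simp only [rankF, ha', hb']
      linarith
    -- a generic member of a block: its rank and index bounds
    have hmem : ∀ (q : Int × List (String × String) → Bool) (f : Int),
        (∀ p, q p = true → (if epGet p.2 "Public/Private" = "Public" then (0:Int) else 1) = f) →
        ∀ a ∈ ((PySem.List.enumerate (e :: es.takeWhile (fun x => epGet x "EndPoint Type" == epGet e "EndPoint Type")) i).filter q).map (rankF n rid),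
        ∃ j : Int, a = (2 * rid + f) * n + j ∧ i ≤ j ∧ j < n := by
      intro q f hq a ha
      obtain ⟨p, hp, rfl⟩ := List.mem_map.1 ha
      have hpf := hq p (List.mem_filter.1 hp).2
      have hpi := hidx p (List.mem_filter.1 hp).1
      exact ⟨p.1, by simp [rankF, hpf], hpi.1, hpi.2⟩
    have hq0 : ∀ p : Int × List (String × String),
        (fun p : Int × List (String × String) => epGet p.2 "Public/Private" == "Public") p = true →
        (if epGet p.2 "Public/Private" = "Public" then (0:Int) else 1) = 0 := by
      intro p hp; simp at hp; simp [hp]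
    have hq1 : ∀ p : Int × List (String × String),
        (fun p : Int × List (String × String) => epGet p.2 "Public/Private" != "Public") p = true →
        (if epGet p.2 "Public/Private" = "Public" then (0:Int) else 1) = 1 := by
      intro p hp; simp at hp; simp [hp]
    -- lower bound for the recursive tail
    have htail : ∀ b ∈ canonRanks n (es.dropWhile (fun x => epGet x "EndPoint Type" == epGet e "EndPoint Type")) (rid + 1)
        (i + ((e :: es.takeWhile (fun x => epGet x "EndPoint Type" == epGet e "EndPoint Type")).length : Int)),
        2 * (rid + 1) * n + (i + ((e :: es.takeWhile (fun x => epGet x "EndPoint Type" == epGet e "EndPoint Type")).length : Int)) ≤ b := by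
      intro b hb
      refine canonRanks_lb n hn _ (rid + 1) _ b (by positivity) hb
    have hLpos : (0:Int) ≤ ((e :: es.takeWhile (fun x => epGet x "EndPoint Type" == epGet e "EndPoint Type")).length : Int) := by positivity
    simp only [List.pairwise_append, List.mem_append]
    refine ⟨⟨hblock _ 0 hq0, hblock _ 1 hq1, ?_⟩, ?_, ?_⟩
    · -- public block < private block
      intro a ha b hb
      obtain ⟨j, rfl, hij, hjn⟩ := hmem _ 0 hq0 a ha
      obtain ⟨j', rfl, hij', hjn'⟩ := hmem _ 1 hq1 b hb
      nlinarith [hn]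
    · -- tail is pairwise
      exact canonRanks_pairwise n _ (rid + 1) _ (by linarith) hrest
    · -- both blocks < tail
      intro a ha b hb
      have hblb := htail b hb
      rcases ha with ha | ha
      · obtain ⟨j, rfl, hij, hjn⟩ := hmem _ 0 hq0 a ha
        nlinarith [hn, hLpos]
      · obtain ⟨j, rfl, hij, hjn⟩ := hmem _ 1 hq1 a ha
        nlinarith [hn, hLpos]
termination_by l.length
decreasing_by simpa using Nat.lt_succ_of_le (List.length_dropWhile_le _ es)

theorem filter_enum_map_snd {α : Type} (q : α → Bool) (xs : List α) :
    ∀ s : Int, ((PySem.List.enumerate xs s).filter (fun p => q p.2)).map (·.2) = xs.filter q := by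
  induction xs with
  | nil => intro s; simp [PySem.List.enumerate]
  | cons x t ih =>
    intro s
    cases hq : q x <;> simp [PySem.List.enumerate, hq, ih]

-- decoding the canonical ranks gives the canonical output
theorem canonRanks_decode (endpoints : List (List (String × String))) (l : List (List (String × String))) :
    ∀ (i : Nat) (rid : Int), l = endpoints.drop i →
    (canonRanks (endpoints.length : Int) l rid (i : Int)).map
        (fun r => PySem.List.pyGetD endpoints (PySem.Int.mod r (endpoints.length : Int)) []) =
      canonRuns l := by
  cases l with
  | nil => intro i rid h; simp [canonRanks, canonRuns]
  | cons e es =>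
    intro i rid hdrop
    have hi : i < endpoints.length := by
      by_contra hle
      have hnil : endpoints.drop i = [] := List.drop_eq_nil_of_le (by omega)
      exact absurd (hdrop.trans hnil) (by simp)
    have hlen : (e :: es).length = endpoints.length - i := by
      rw [hdrop, List.length_drop]
    have hrl : (e :: es.takeWhile (fun x => epGet x "EndPoint Type" == epGet e "EndPoint Type")).length ≤ (e :: es).length := by
      simp only [List.length_cons]
      exact Nat.succ_le_succ (List.IsPrefix.length_le (List.takeWhile_prefix _))
    have hbound : i + (e :: es.takeWhile (fun x => epGet x "EndPoint Type" == epGet e "EndPoint Type")).length ≤ endpoints.length := by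
      omega
    have hrun_tw : (e :: es).takeWhile (fun x => epGet x "EndPoint Type" == epGet e "EndPoint Type") =
        e :: es.takeWhile (fun x => epGet x "EndPoint Type" == epGet e "EndPoint Type") := by
      rw [List.takeWhile_cons]; simp
    have hpre : (e :: es.takeWhile (fun x => epGet x "EndPoint Type" == epGet e "EndPoint Type")) <+: (e :: es) := by
      rw [← hrun_tw]; exact List.takeWhile_prefix _
    have hget : ∀ (k : Nat) (hk : k < (e :: es.takeWhile (fun x => epGet x "EndPoint Type" == epGet e "EndPoint Type")).length),
        ∃ hik : i + k < endpoints.length,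
        (e :: es.takeWhile (fun x => epGet x "EndPoint Type" == epGet e "EndPoint Type"))[k] = endpoints[i + k] := by
      intro k hk
      have hik : i + k < endpoints.length := by omega
      refine ⟨hik, ?_⟩
      have hk2 : k < (e :: es).length := lt_of_lt_of_le hk hrl
      have hk3 : k < (endpoints.drop i).length := by rw [← hdrop]; exact hk2
      calc (e :: es.takeWhile (fun x => epGet x "EndPoint Type" == epGet e "EndPoint Type"))[k]'hk
          = (e :: es)[k]'hk2 := hpre.getElem hk
        _ = (endpoints.drop i)[k]'hk3 := List.getElem_of_eq hdrop hk2
        _ = endpoints[i + k]'hik := by rw [List.getElem_drop]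
    -- decoding one rank
    have hdec : ∀ (c : Int) (k : Nat) (hik : i + k < endpoints.length),
        PySem.List.pyGetD endpoints (PySem.Int.mod (c * (endpoints.length : Int) + ((i : Int) + (k : Int))) (endpoints.length : Int)) [] =
          endpoints[i + k]'hik := by
      intro c k hik
      have hmod : PySem.Int.mod (c * (endpoints.length : Int) + ((i : Int) + (k : Int))) (endpoints.length : Int) = ((i + k : Nat) : Int) := by
        show Int.fmod _ _ = _
        rw [show c * (endpoints.length : Int) + ((i : Int) + (k : Int)) = ((i : Int) + (k : Int)) + (endpoints.length : Int) * c by ring]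
        rw [Int.add_mul_fmod_self_left, Int.fmod_eq_emod]
        rw [if_pos (Or.inl (by positivity))]
        rw [Int.emod_eq_of_lt (by positivity)
          (by exact_mod_cast hik)]
        push_cast; ring
      rw [hmod, PySem.List.pyGetD_natCast, List.getD_eq_getElem]
    simp only [canonRanks, canonRuns, List.map_append, List.map_map]
    refine congrArg₂ (· ++ ·) (congrArg₂ (· ++ ·) ?_ ?_) ?_
    · -- public block decodes to the public members of the run
      rw [← filter_enum_map_snd (fun x => epGet x "Public/Private" == "Public")
            (e :: es.takeWhile (fun x => epGet x "EndPoint Type" == epGet e "EndPoint Type")) i]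
      refine List.map_congr_left ?_
      intro p hp
      have hpe := (List.mem_filter.1 hp).1
      obtain ⟨k, hk, rfl⟩ := (PySem.List.mem_enumerate_iff _ _ _).1 hpe
      simp only [Function.comp, rankF]
      rw [hdec _ k (by omega)]
      obtain ⟨hik, hgk⟩ := hget k hk
      exact hgk.symm
    · rw [← filter_enum_map_snd (fun x => epGet x "Public/Private" != "Public")
            (e :: es.takeWhile (fun x => epGet x "EndPoint Type" == epGet e "EndPoint Type")) i]
      refine List.map_congr_left ?_
      intro p hp
      have hpe := (List.mem_filter.1 hp).1
      obtain ⟨k, hk, rfl⟩ := (PySem.List.mem_enumerate_iff _ _ _).1 hpe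
      simp only [Function.comp, rankF]
      rw [hdec _ k (by omega)]
      obtain ⟨hik, hgk⟩ := hget k hk
      exact hgk.symm
    · -- the tail: recursive call at the next run start
      have hdrop' : es.dropWhile (fun x => epGet x "EndPoint Type" == epGet e "EndPoint Type") =
          endpoints.drop (i + (e :: es.takeWhile (fun x => epGet x "EndPoint Type" == epGet e "EndPoint Type")).length) := by
        have hsplit : (e :: es.takeWhile (fun x => epGet x "EndPoint Type" == epGet e "EndPoint Type")) ++
            es.dropWhile (fun x => epGet x "EndPoint Type" == epGet e "EndPoint Type") = e :: es := by
          rw [← hrun_tw]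
          have hdw : (e :: es).dropWhile (fun x => epGet x "EndPoint Type" == epGet e "EndPoint Type") =
              es.dropWhile (fun x => epGet x "EndPoint Type" == epGet e "EndPoint Type") := by
            rw [List.dropWhile_cons]; simp
          rw [← hdw, List.takeWhile_append_dropWhile]
        have h1 : ((e :: es.takeWhile (fun x => epGet x "EndPoint Type" == epGet e "EndPoint Type")) ++
            es.dropWhile (fun x => epGet x "EndPoint Type" == epGet e "EndPoint Type")).drop
              (e :: es.takeWhile (fun x => epGet x "EndPoint Type" == epGet e "EndPoint Type")).length =
            es.dropWhile (fun x => epGet x "EndPoint Type" == epGet e "EndPoint Type") := List.drop_left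
        rw [hsplit] at h1
        rw [← h1, hdrop, List.drop_drop, Nat.add_comm]
      have hcast : (i : Int) + ((e :: es.takeWhile (fun x => epGet x "EndPoint Type" == epGet e "EndPoint Type")).length : Nat) =
          ((i + (e :: es.takeWhile (fun x => epGet x "EndPoint Type" == epGet e "EndPoint Type")).length : Nat) : Int) := by
        push_cast; ring
      rw [hcast]
      exact canonRanks_decode endpoints _ _ (rid + 1) hdrop'
termination_by l.length
decreasing_by simpa using Nat.lt_succ_of_le (List.length_dropWhile_le _ es)

theorem alt_eq_canon (endpoints : List (List (String × String))) :
    sort_endpoint_alt endpoints = canonRuns endpoints := by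
  simp only [sort_endpoint_alt]
  rw [foldl_ranksLoop]
  simp only [List.nil_append]
  rw [PySem.List.sorted_eq_of_perm_of_pairwise_lt _ (canonRanks (endpoints.length : Int) endpoints 0 0)
        (fun r => r) (canonRanks_perm _ _ 0 0)
        (canonRanks_pairwise _ _ 0 0 le_rfl (by simp))]
  have h := canonRanks_decode endpoints endpoints 0 0 (by simp)
  simpa using h

-- ===== VERDICT (by name: the statement is the Claim_ definition above) =====
theorem sort_endpoint_spec : Claim_equal_sort_endpoint := by
  intro endpoints _ _
  unfold Spec_sort_endpoint
  rw [sort_endpoint_eq_canon, alt_eq_canon]
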